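-- pv_equiv track=rewrite | github.com/sohds/Ohs-practice-repository | PGS/코딩 기초 트레이닝/[PGS] 코딩기초_Day17_Day18.py | solution
-- ===== SOURCE A (Python) =====
-- def solution(myString, pat):
--     change = ''
--     for letter in list(myString):
--         if letter == 'A':
--             change += 'B'
--         elif letter == 'B':
--             change += 'A'
--     return 1 if pat in change else 0
-- ===== SOURCE B (Python) =====
-- def solution(myString, pat):
--     # Swap A<->B in the (short) pattern once instead of rewriting the text,
--     # and search it in the text restricted to its A/B letters.
--     swapped_pat = ''.join('B' if c == 'A' else 'A' if c == 'B' else c for c in pat)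
--     kept = ''.join(c for c in myString if c == 'A' or c == 'B')
--     return 1 if swapped_pat in kept else 0
-- ===== Notes on version B (the rewrite author's own statement) =====
-- stated objective: alternative
-- what changed: Instead of building the A/B-swapped text and searching pat in it, B swaps A/B in the pattern once and searches the swapped pattern in the text filtered to its A/B letters (correct because the swap is an involution and the transformed text contains only A/B).
import Mathlib
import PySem

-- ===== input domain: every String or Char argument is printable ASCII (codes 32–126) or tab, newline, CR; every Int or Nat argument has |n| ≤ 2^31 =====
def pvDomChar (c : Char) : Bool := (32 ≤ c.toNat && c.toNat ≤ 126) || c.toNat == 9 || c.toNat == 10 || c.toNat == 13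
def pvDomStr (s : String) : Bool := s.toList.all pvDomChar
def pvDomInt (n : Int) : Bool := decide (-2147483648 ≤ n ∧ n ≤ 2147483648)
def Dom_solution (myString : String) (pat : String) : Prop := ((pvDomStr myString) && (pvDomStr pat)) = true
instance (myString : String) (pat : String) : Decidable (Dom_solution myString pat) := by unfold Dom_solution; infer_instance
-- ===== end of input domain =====

-- B swaps A/B in the pattern once and searches the text filtered to its A/B letters,
-- instead of building the swapped text; same return value, an alternative decomposition.


-- ===== PORT A =====
-- change = ''; for letter in myString: A -> +'B', B -> +'A'; return 1 if pat in change else 0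
def solution (myString : String) (pat : String) : Int :=
  let change := myString.toList.foldl
    (fun acc c => if c = 'A' then acc ++ ['B'] else if c = 'B' then acc ++ ['A'] else acc) []
  if PySem.Chars.isIn pat.toList change then 1 else 0

-- ===== PORT B =====
def swapAB (c : Char) : Char := if c = 'A' then 'B' else if c = 'B' then 'A' else c

def solution_alt (myString : String) (pat : String) : Int :=
  let swappedPat := pat.toList.map swapAB
  let kept := myString.toList.filter (fun c => c == 'A' || c == 'B')
  if PySem.Chars.isIn swappedPat kept then 1 else 0

-- ===== PRECONDITION & SPEC =====
def Spec_solution (myString : String) (pat : String) (out : Int) : Prop := out = solution_alt myString pat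
instance (myString : String) (pat : String) (out : Int) : Decidable (Spec_solution myString pat out) := by unfold Spec_solution; infer_instance

-- ===== CLAIM (what is proved, stated in full; the proofs are below) =====
def Claim_equal_solution : Prop := ∀ (myString : String) (pat : String), Dom_solution myString pat → Spec_solution myString pat (solution myString pat)

-- ===== LEMMAS AND PROOFS =====

theorem swapAB_swapAB (c : Char) : swapAB (swapAB c) = c := by
  unfold swapAB; split_ifs <;> simp_all

theorem map_swapAB_involutive (l : List Char) : (l.map swapAB).map swapAB = l := by
  simp [List.map_map, Function.comp_def, swapAB_swapAB]

-- A's loop builds the swapped image of the A/B letters of the text.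
theorem changeLoop_eq (l : List Char) (acc : List Char) :
    l.foldl (fun acc c => if c = 'A' then acc ++ ['B'] else if c = 'B' then acc ++ ['A'] else acc) acc
      = acc ++ (l.filter (fun c => c == 'A' || c == 'B')).map swapAB := by
  induction l generalizing acc with
  | nil => simp
  | cons c t ih =>
    simp only [List.foldl_cons, List.filter_cons]
    by_cases hA : c = 'A'
    · simp [hA, ih, swapAB]
    · by_cases hB : c = 'B'
      · simp [hB, ih, swapAB]
      · simp [hA, hB, ih]

theorem infix_map_swap_iff (p t : List Char) :
    p <:+: t.map swapAB ↔ p.map swapAB <:+: t := by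
  constructor
  · intro h
    have := h.map swapAB
    rwa [map_swapAB_involutive] at this
  · intro h
    have := h.map swapAB
    rwa [map_swapAB_involutive] at this

-- ===== VERDICT (by name: the statement is the Claim_ definition above) =====
theorem solution_spec : Claim_equal_solution := by
  intro myString pat _
  unfold Spec_solution solution solution_alt
  simp only [changeLoop_eq, List.nil_append]
  by_cases h : pat.toList <:+: (myString.toList.filter (fun c => c == 'A' || c == 'B')).map swapAB
  · rw [if_pos ((PySem.Chars.isIn_iff_infix _ _).mpr h),
        if_pos ((PySem.Chars.isIn_iff_infix _ _).mpr ((infix_map_swap_iff _ _).mp h))]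
  · rw [if_neg (fun hc => h ((PySem.Chars.isIn_iff_infix _ _).mp hc)),
        if_neg (fun hc => h ((infix_map_swap_iff _ _).mpr ((PySem.Chars.isIn_iff_infix _ _).mp hc)))]
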